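-- pv_equiv track=rewrite | github.com/Karol-2/wspolbiezne_programowanie | zad03/zad3.py | znajdz_dyrektywy_input
-- ===== SOURCE A (Python) =====
-- def znajdz_dyrektywy_input(text):
--     dyrektywy = []
--     pozycja = 0
--
--     while True:
--         pozycja_start = text.find('\\input{', pozycja)
--         if pozycja_start == -1:
--             break
--         pozycja_koniec = text.find('}', pozycja_start)
--         if pozycja_koniec == -1:
--             break
--
--         nazwa_pliku = text[pozycja_start + 7:pozycja_koniec]
--         dyrektywy.append(nazwa_pliku)
--         pozycja = pozycja_koniec + 1
--
--     return dyrektywy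
-- ===== SOURCE B (Python) =====
-- import re
--
-- _INPUT_RGX = re.compile(r'\\input\{([^}]*)\}')
--
-- def znajdz_dyrektywy_input(text):
--     return _INPUT_RGX.findall(text)
-- ===== Notes on version B (the rewrite author's own statement) =====
-- stated objective: idiomatic
-- what changed: Replaced the manual while-loop of str.find calls, index bookkeeping and slicing by a single precompiled regex findall (r'\\input\{([^}]*)\}') returning the captures directly.
import Mathlib
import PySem

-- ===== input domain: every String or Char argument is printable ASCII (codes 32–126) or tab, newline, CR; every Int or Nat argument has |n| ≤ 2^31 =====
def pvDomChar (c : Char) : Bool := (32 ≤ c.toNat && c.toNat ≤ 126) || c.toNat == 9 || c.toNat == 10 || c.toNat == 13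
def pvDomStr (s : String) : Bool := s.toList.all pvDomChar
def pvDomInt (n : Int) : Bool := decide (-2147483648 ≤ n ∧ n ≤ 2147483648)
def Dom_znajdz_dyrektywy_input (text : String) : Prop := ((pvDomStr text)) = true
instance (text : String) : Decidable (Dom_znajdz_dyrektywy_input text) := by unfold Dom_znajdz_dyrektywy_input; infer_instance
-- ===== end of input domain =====

-- B replaces A's hand-written find/slice while-loop by the idiomatic single regex
-- re.findall(r'\\input\{([^}]*)\}', text); return values proved equal on all inputs.

-- ===== PORT A =====
-- the literal '\input{'
def patInput : List Char := ['\\', 'i', 'n', 'p', 'u', 't', '{']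

-- facts about findFrom needed for the while-loop's termination
theorem findFrom_facts (s sub : List Char) (k : Int) (h0 : 0 ≤ k)
    (h : PySem.Chars.findFrom s sub k none ≠ -1) :
    k ≤ PySem.Chars.findFrom s sub k none ∧ k ≤ s.length ∧
      (sub ≠ [] → (PySem.Chars.findFrom s sub k none).toNat < s.length) := by
  have htake : List.take (Int.toNat (s.length : Int)) s = s := by simp
  simp only [PySem.Chars.findFrom, if_neg (not_lt.2 h0), htake] at h ⊢
  by_cases hlt : (s.length : Int) < k
  · rw [if_pos hlt] at h; exact absurd rfl h
  rw [if_neg hlt] at h ⊢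
  set r := PySem.Chars.find (s.drop k.toNat) sub with hr
  by_cases hrn : r = -1
  · rw [if_pos hrn] at h; exact absurd rfl h
  rw [if_neg hrn] at h ⊢
  have hr0 : 0 ≤ r := by
    have := PySem.Chars.neg_one_le_find (s.drop k.toNat) sub
    rw [← hr] at this; omega
  have hrl : r ≤ ((s.drop k.toNat).length : Int) := by
    have := PySem.Chars.find_le_length (s.drop k.toNat) sub
    rw [← hr] at this; exact_mod_cast this
  simp only [List.length_drop] at hrl
  refine ⟨by omega, by omega, ?_⟩
  intro hne
  have hspec := PySem.Chars.find_spec (s := s.drop k.toNat) (sub := sub) (by rw [← hr]; exact hr0)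
  rw [← hr] at hspec
  have hpre := hspec.1
  have hne2 : (s.drop k.toNat).drop r.toNat ≠ [] := by
    intro hnil
    rw [hnil] at hpre
    exact hne (List.prefix_nil.mp hpre)
  have hlt2 : r.toNat < (s.drop k.toNat).length := by
    by_contra hge
    exact hne2 (List.drop_eq_nil_of_le (by omega))
  simp only [List.length_drop] at hlt2
  omega

-- the 'while True' loop of A, position-based, via PySem.Chars.findFrom (= str.find)
def loopA (s : List Char) (dyrektywy : List String) (pozycja : Nat) : List String :=
  let start := PySem.Chars.findFrom s patInput (pozycja : Int) none
  if h1 : start = -1 then dyrektywy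
  else
    let koniec := PySem.Chars.findFrom s ['}'] start none
    if h2 : koniec = -1 then dyrektywy
    else
      loopA s (dyrektywy ++ [String.ofList (PySem.List.slice s (some (start + 7)) (some koniec))])
        (koniec.toNat + 1)
termination_by s.length + 1 - pozycja
decreasing_by
  have f1 := findFrom_facts s patInput (pozycja : Int) (by positivity) h1
  have f2 := findFrom_facts s ['}'] (PySem.Chars.findFrom s patInput (pozycja : Int) none)
      (by omega) h2
  have := f2.2.2 (by simp)
  omega

def znajdz_dyrektywy_input (text : String) : List String :=
  loopA text.toList [] 0

-- ===== PORT B =====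
-- hand port of re.findall(r'\\input\{([^}]*)\}', text): the standard left-to-right
-- regex scan for this fixed pattern — at each position try to match '\input{',
-- then the capture [^}]* (takeWhile ≠ '}'), then '}'; on success emit the capture and
-- resume after the match, otherwise advance one character.  Exact for this pattern.
def scanAlt : List Char → List String
  | [] => []
  | c :: rest =>
    if patInput.isPrefixOf (c :: rest) then
      let after := rest.drop 6
      let name := after.takeWhile (fun x => x ≠ '}')
      if name.length < after.length then
        String.ofList name :: scanAlt (after.drop (name.length + 1))
      else scanAlt rest
    else scanAlt rest
termination_by l => l.length
decreasing_by
  · simp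
  · simp
  · simp

def znajdz_dyrektywy_input_alt (text : String) : List String :=
  scanAlt text.toList

-- ===== PRECONDITION & SPEC =====
def Spec_znajdz_dyrektywy_input (text : String) (out : List String) : Prop := out = znajdz_dyrektywy_input_alt text
instance (text : String) (out : List String) : Decidable (Spec_znajdz_dyrektywy_input text out) := by unfold Spec_znajdz_dyrektywy_input; infer_instance

-- ===== CLAIM (what is proved, stated in full; the proofs are below) =====
def Claim_equal_znajdz_dyrektywy_input : Prop := ∀ (text : String), Dom_znajdz_dyrektywy_input text → Spec_znajdz_dyrektywy_input text (znajdz_dyrektywy_input text)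

-- ===== LEMMAS AND PROOFS =====

-- a list with no '}' yields nothing
theorem scanAlt_no_close (l : List Char) (h : '}' ∉ l) : scanAlt l = [] := by
  induction l using scanAlt.induct with
  | case1 => rw [scanAlt]
  | case2 c rest hpre after name hlen ih =>
      exfalso
      have hafter : '}' ∉ rest.drop 6 :=
        fun hm => h (List.mem_cons_of_mem _ (List.mem_of_mem_drop hm))
      have heq : (rest.drop 6).takeWhile (fun x => decide (x ≠ '}')) = rest.drop 6 :=
        List.takeWhile_eq_self_iff.mpr (fun x hx => by
          simp only [decide_eq_true_eq]
          exact fun h' => hafter (h' ▸ hx))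
      simp only [after, name, heq] at hlen
      exact lt_irrefl _ hlen
  | case3 c rest hpre after name hlen ih =>
      rw [scanAlt]
      simp only [name, after] at hlen
      simp only [if_pos hpre, if_neg hlen]
      exact ih (fun hm => h (List.mem_cons_of_mem _ hm))
  | case4 c rest hpre ih =>
      rw [scanAlt]
      simp only [if_neg hpre]
      exact ih (fun hm => h (List.mem_cons_of_mem _ hm))

-- positions before the first match can be skipped
theorem scanAlt_drop (j : Nat) (l : List Char)
    (h : ∀ i < j, ¬ patInput <+: l.drop i) : scanAlt l = scanAlt (l.drop j) := by
  induction j generalizing l with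
  | zero => simp
  | succ j ih =>
      cases l with
      | nil => simp
      | cons c rest =>
          have h0 : ¬ patInput <+: (c :: rest) := by simpa using h 0 (Nat.succ_pos j)
          have hstep : scanAlt (c :: rest) = scanAlt rest := by
            rw [scanAlt]
            simp only [if_neg (fun hb => h0 (List.isPrefixOf_iff_prefix.mp hb))]
          rw [hstep, List.drop_succ_cons]
          exact ih rest (fun i hi => by
            simpa [List.drop_succ_cons] using h (i + 1) (by omega))

-- find of a singleton = length of the takeWhile prefix
theorem find_eq_of (l sub : List Char) (n : Nat) (h1 : sub <+: l.drop n)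
    (h2 : ∀ i < n, ¬ sub <+: l.drop i) : PySem.Chars.find l sub = n := by
  have hinf : sub <:+: l := h1.isInfix.trans (List.drop_suffix n l).isInfix
  have hge : 0 ≤ PySem.Chars.find l sub := (PySem.Chars.find_nonneg_iff l sub).mpr hinf
  have hspec := PySem.Chars.find_spec hge
  rcases lt_trichotomy (PySem.Chars.find l sub).toNat n with hlt | heq | hgt
  · exact absurd hspec.1 (h2 _ hlt)
  · omega
  · exact absurd h1 (hspec.2 n hgt)

theorem find_singleton_mem (c : Char) (l : List Char) (h : c ∈ l) :
    PySem.Chars.find l [c] = ((l.takeWhile (fun x => x ≠ c)).length : Int) := by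
  set p : Char → Bool := fun x => decide (x ≠ c) with hp
  have hsplit : l.takeWhile p ++ l.dropWhile p = l := List.takeWhile_append_dropWhile
  have hdrop : l.drop (l.takeWhile p).length = l.dropWhile p := by
    have h2 := List.drop_left (l₁ := l.takeWhile p) (l₂ := l.dropWhile p)
    rwa [hsplit] at h2
  have hne : l.dropWhile p ≠ [] := by
    intro hnil
    have hcopy := hsplit
    rw [hnil, List.append_nil] at hcopy
    have := List.takeWhile_eq_self_iff.mp hcopy c h
    simp [hp] at this
  apply find_eq_of
  · rw [hdrop]
    obtain ⟨d, t, hdt⟩ := List.exists_cons_of_ne_nil hne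
    have hd : p d = false := by
      have hh := List.head_dropWhile_not p (l := l) hne
      simp only [hdt, List.head_cons] at hh
      exact hh
    have hdc : d = c := by simpa [hp] using hd
    rw [hdt, hdc]
    exact ⟨t, rfl⟩
  · intro i hi hpre
    obtain ⟨t, ht⟩ := hpre
    have hgi : l[i]? = some c := by
      have : (l.drop i)[0]? = some c := by rw [← ht]; rfl
      simpa [List.getElem?_drop] using this
    have hti : l[i]? = (l.takeWhile p)[i]? := by
      conv_lhs => rw [← hsplit]
      rw [List.getElem?_append_left hi]
    have hmem : c ∈ l.takeWhile p := by
      rw [hti] at hgi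
      exact List.mem_of_getElem? hgi
    have := List.mem_takeWhile_imp hmem
    simp [hp] at this

-- positions before the first '\input{' have no pattern prefix, so scanAlt skips them
theorem scanAlt_of_no_infix (l : List Char) (h : ¬ patInput <:+: l) : scanAlt l = [] := by
  rw [scanAlt_drop l.length l
      (fun i _ hpre => h (hpre.isInfix.trans (List.drop_suffix i l).isInfix)),
    List.drop_length, scanAlt]

theorem loopA_eq (s : List Char) (acc : List String) (p : Nat) (hp : p ≤ s.length) :
    loopA s acc p = acc ++ scanAlt (s.drop p) := by
  induction acc, p using loopA.induct s with
  | case1 acc p start h1 =>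
      simp only [start] at h1
      rw [loopA, dif_pos h1]
      have hnc := PySem.Chars.findFrom_natCast s patInput p hp
      by_cases hf : PySem.Chars.find (s.drop p) patInput = -1
      · rw [scanAlt_of_no_infix (s.drop p)
          ((PySem.Chars.find_eq_neg_one_iff (s.drop p) patInput).mp hf), List.append_nil]
      · exfalso
        rw [hnc, if_neg hf] at h1
        have := PySem.Chars.neg_one_le_find (s.drop p) patInput
        omega
  | case2 acc p start h1 koniec h2 =>
      simp only [start] at h1
      simp only [koniec, start] at h2
      rw [loopA, dif_neg h1, dif_pos h2]
      -- first match position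
      have hnc := PySem.Chars.findFrom_natCast s patInput p hp
      have hf : PySem.Chars.find (s.drop p) patInput ≠ -1 := by
        intro hf; rw [hnc, if_pos hf] at h1; exact h1 rfl
      have hf0 : 0 ≤ PySem.Chars.find (s.drop p) patInput := by
        have := PySem.Chars.neg_one_le_find (s.drop p) patInput; omega
      set J := (PySem.Chars.find (s.drop p) patInput).toNat with hJ
      have hspec := PySem.Chars.find_spec (s := s.drop p) (sub := patInput) hf0
      have hJle : p + J ≤ s.length := by
        have := PySem.Chars.find_le_length (s.drop p) patInput
        simp only [List.length_drop] at this
        omega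
      have hstart : PySem.Chars.findFrom s patInput (p : Int) = ((p + J : Nat) : Int) := by
        rw [hnc, if_neg hf]; push_cast; omega
      -- no '}' after the match position
      have hnc2 := PySem.Chars.findFrom_natCast s ['}'] (p + J) hJle
      rw [hstart] at h2
      have hg : PySem.Chars.find (s.drop (p + J)) ['}'] = -1 := by
        by_contra hg
        rw [hnc2, if_neg hg] at h2
        have := PySem.Chars.neg_one_le_find (s.drop (p + J)) ['}']
        omega
      have hmem : '}' ∉ s.drop (p + J) := by
        intro hm
        exact (PySem.Chars.find_eq_neg_one_iff _ _).mp hg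
          ((List.singleton_infix_iff '}' _).mpr hm)
      rw [scanAlt_drop J (s.drop p) hspec.2, List.drop_drop]
      rw [scanAlt_no_close _ hmem, List.append_nil]
  | case3 acc p start h1 koniec h2 ih =>
      simp only [start] at h1
      simp only [koniec, start] at h2
      simp only [koniec, start] at ih
      rw [loopA, dif_neg h1, dif_neg h2]
      -- first match position J
      have hp2 := hp
      have hnc := PySem.Chars.findFrom_natCast s patInput p hp
      have hf : PySem.Chars.find (s.drop p) patInput ≠ -1 := by
        intro hf; rw [hnc, if_pos hf] at h1; exact h1 rfl
      have hf0 : 0 ≤ PySem.Chars.find (s.drop p) patInput := by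
        have := PySem.Chars.neg_one_le_find (s.drop p) patInput; omega
      set J := (PySem.Chars.find (s.drop p) patInput).toNat with hJ
      have hspec := PySem.Chars.find_spec (s := s.drop p) (sub := patInput) hf0
      have hJle : p + J ≤ s.length := by
        have := PySem.Chars.find_le_length (s.drop p) patInput
        simp only [List.length_drop] at this
        omega
      have hstart : PySem.Chars.findFrom s patInput (p : Int) = ((p + J : Nat) : Int) := by
        rw [hnc, if_neg hf]; push_cast; omega
      -- decompose the suffix at the match:  s.drop (p+J) = patInput ++ t
      obtain ⟨t, ht⟩ := hspec.1
      have hdropJ : (s.drop p).drop J = s.drop (p + J) := List.drop_drop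
      rw [hdropJ] at ht
      -- the first '}' after the match
      have hnc2 := PySem.Chars.findFrom_natCast s ['}'] (p + J) hJle
      rw [hstart] at h2
      have hg : PySem.Chars.find (s.drop (p + J)) ['}'] ≠ -1 := by
        intro hg; rw [hnc2, if_pos hg] at h2; exact h2 rfl
      have hg0 : 0 ≤ PySem.Chars.find (s.drop (p + J)) ['}'] := by
        have := PySem.Chars.neg_one_le_find (s.drop (p + J)) ['}']; omega
      have hmem : '}' ∈ s.drop (p + J) :=
        (List.singleton_infix_iff '}' _).mp
          ((PySem.Chars.find_nonneg_iff _ _).mp hg0)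
      have hmemt : '}' ∈ t := by
        rw [← ht] at hmem
        simpa [patInput] using hmem
      -- value of that find: 7 + the capture length m
      set m := (t.takeWhile (fun x => decide (x ≠ '}'))).length with hm
      have htw : (patInput ++ t).takeWhile (fun x => decide (x ≠ '}'))
          = patInput ++ t.takeWhile (fun x => decide (x ≠ '}')) := by
        rw [List.takeWhile_append, if_pos (by decide)]
      have hfind : PySem.Chars.find (s.drop (p + J)) ['}'] = ((7 + m : Nat) : Int) := by
        rw [← ht, find_singleton_mem '}' _ (ht ▸ hmem)]
        rw [htw, List.length_append, ← hm]
        norm_num [patInput]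
      have hkon : PySem.Chars.findFrom s ['}'] ((p + J : Nat) : Int)
          = ((p + J + 7 + m : Nat) : Int) := by
        rw [hnc2, if_neg hg, hfind]; push_cast; ring
      -- capture is shorter than t (t contains '}')
      have hmlt : m < t.length := by
        rcases lt_or_eq_of_le (List.takeWhile_prefix
            (l := t) (fun x => decide (x ≠ '}'))).length_le with h | h
        · exact h
        · exfalso
          have := List.takeWhile_eq_self_iff.mp
            ((List.takeWhile_prefix _).eq_of_length h) '}' hmemt
          simp at this
      have htlen : t.length = s.length - (p + J + 7) := by
        have := congrArg List.length ht
        simp [patInput] at this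
        omega
      -- the slice = the capture
      have htake : t.take m = t.takeWhile (fun x => decide (x ≠ '}')) := by
        obtain ⟨r, hr⟩ := List.takeWhile_prefix (l := t) (fun x => decide (x ≠ '}'))
        have h2 := List.take_left (l₁ := t.takeWhile (fun x => decide (x ≠ '}'))) (l₂ := r)
        rw [hr] at h2
        rw [hm]
        exact h2
      have hdrop7 : s.drop (p + J + 7) = t := by
        have := congrArg (List.drop 7) ht
        rw [List.drop_drop] at this
        simpa [patInput] using this.symm
      have hslice : PySem.List.slice s (some (((p + J : Nat) : Int) + 7))
          (some ((p + J + 7 + m : Nat) : Int))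
          = t.takeWhile (fun x => decide (x ≠ '}')) := by
        have hcast : (((p + J : Nat) : Int) + 7) = ((p + J + 7 : Nat) : Int) := by push_cast; ring
        rw [hcast, PySem.List.slice_natCast, hdrop7]
        have : p + J + 7 + m - (p + J + 7) = m := by omega
        rw [this, htake]
      -- rewrite the recursive call with the IH
      rw [hstart, hkon] at ih ⊢
      have hpos : ((p + J + 7 + m : Nat) : Int).toNat = p + J + 7 + m := by omega
      rw [hpos] at ih ⊢
      rw [hslice] at ih ⊢
      rw [ih (by omega)]
      -- now compute scanAlt on the suffix
      rw [scanAlt_drop J (s.drop p) hspec.2, hdropJ, ← ht]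
      have hpre2 : patInput.isPrefixOf (patInput ++ t) = true :=
        List.isPrefixOf_iff_prefix.mpr ⟨t, rfl⟩
      have hdrop6 : List.drop 6 (['i', 'n', 'p', 'u', 't', '{'] ++ t) = t := by
        have := List.drop_left (l₁ := ['i', 'n', 'p', 'u', 't', '{']) (l₂ := t)
        simpa using this
      have hunf : scanAlt (patInput ++ t)
          = String.ofList (t.takeWhile (fun x => decide (x ≠ '}')))
              :: scanAlt (t.drop (m + 1)) := by
        rw [show patInput ++ t = '\\' :: (['i', 'n', 'p', 'u', 't', '{'] ++ t) from by
          simp [patInput]]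
        rw [scanAlt]
        rw [if_pos (by
          rw [List.isPrefixOf_iff_prefix]
          exact ⟨t, by simp [patInput]⟩)]
        rw [if_pos (by rw [hdrop6, ← hm]; exact hmlt)]
        rw [hdrop6, ← hm]
      rw [hunf]
      have hfin : List.drop (p + J + 7 + m + 1) s = List.drop (m + 1) t := by
        have hdd := List.drop_drop (i := m + 1) (j := p + J + 7) (l := s)
        rw [hdrop7] at hdd
        simpa [Nat.add_assoc] using hdd.symm
      rw [hfin]
      simp


-- ===== VERDICT (by name: the statement is the Claim_ definition above) =====
theorem znajdz_dyrektywy_input_spec : Claim_equal_znajdz_dyrektywy_input := by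
  intro text _
  unfold Spec_znajdz_dyrektywy_input znajdz_dyrektywy_input znajdz_dyrektywy_input_alt
  simpa using loopA_eq text.toList [] 0 (by simp)
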